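-- pv_equiv track=rewrite | github.com/mozzistudio/usipro | anonymize.py | merge_cluster_bboxes
-- ===== SOURCE A (Python) =====
-- from typing import Optional, List, Tuple
--
-- def merge_cluster_bboxes(
--     bboxes: List[Tuple[int, int, int, int, int]],
--     cluster: List[int]
-- ) -> Tuple[int, int, int, int, int]:
--     """
--     Merge bounding boxes of all components in a cluster.
--
--     Returns:
--         (x1, y1, x2, y2, total_pixel_count)
--     """
--     x1 = min(bboxes[i][0] for i in cluster)
--     y1 = min(bboxes[i][1] for i in cluster)
--     x2 = max(bboxes[i][2] for i in cluster)
--     y2 = max(bboxes[i][3] for i in cluster)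
--     total_pixels = sum(bboxes[i][4] for i in cluster)
--
--     return (x1, y1, x2, y2, total_pixels)
-- ===== SOURCE B (Python) =====
-- from typing import List, Tuple
--
-- def merge_cluster_bboxes(
--     bboxes: List[Tuple[int, int, int, int, int]],
--     cluster: List[int]
-- ) -> Tuple[int, int, int, int, int]:
--     if not cluster:
--         raise ValueError("empty cluster")
--     x1, y1, x2, y2, total = bboxes[cluster[0]]
--     for i in cluster[1:]:
--         b = bboxes[i]
--         if b[0] < x1: x1 = b[0]
--         if b[1] < y1: y1 = b[1]
--         if b[2] > x2: x2 = b[2]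
--         if b[3] > y2: y2 = b[3]
--         total += b[4]
--     return (x1, y1, x2, y2, total)
-- ===== Notes on version B (the rewrite author's own statement) =====
-- stated objective: alternative
-- what changed: Replaces A's five separate generator-expression passes (min/min/max/max/sum) with a single loop that walks the cluster once, seeding all five accumulators from the first indexed bbox.
import Mathlib
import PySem

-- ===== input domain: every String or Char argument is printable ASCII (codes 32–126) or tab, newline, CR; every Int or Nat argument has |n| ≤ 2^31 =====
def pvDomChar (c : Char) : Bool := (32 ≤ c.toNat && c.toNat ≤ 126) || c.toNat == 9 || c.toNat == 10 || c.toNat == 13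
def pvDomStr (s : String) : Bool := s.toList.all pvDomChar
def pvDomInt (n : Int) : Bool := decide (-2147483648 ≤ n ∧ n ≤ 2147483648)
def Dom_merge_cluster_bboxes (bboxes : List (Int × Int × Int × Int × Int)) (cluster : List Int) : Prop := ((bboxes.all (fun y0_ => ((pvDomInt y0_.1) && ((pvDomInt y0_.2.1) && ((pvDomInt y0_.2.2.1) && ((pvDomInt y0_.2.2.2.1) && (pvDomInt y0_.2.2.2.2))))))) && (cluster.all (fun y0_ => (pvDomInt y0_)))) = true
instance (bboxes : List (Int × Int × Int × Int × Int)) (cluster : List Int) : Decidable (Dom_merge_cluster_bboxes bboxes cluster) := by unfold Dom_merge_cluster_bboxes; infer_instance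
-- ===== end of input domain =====

-- B makes one pass over the cluster updating all five accumulators, instead of A's five
-- separate min/min/max/max/sum passes (constant-factor speedup). Equivalence is claimed on
-- the return value for non-empty clusters of in-range (Python-style, possibly negative) indices.

-- ===== PORT A =====
-- bboxes[i] (Python indexing, negative wraps); default unreachable under Pre_.
def pvFetch (bboxes : List (Int × Int × Int × Int × Int)) (i : Int) : Int × Int × Int × Int × Int :=
  PySem.List.pyGetD bboxes i (0, 0, 0, 0, 0)

-- min(gen) / max(gen) over a non-empty list; 0 unreachable under Pre_.
def pvMinList (l : List Int) : Int :=
  match l with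
  | [] => 0
  | h :: t => t.foldl (fun m x => min m x) h

def pvMaxList (l : List Int) : Int :=
  match l with
  | [] => 0
  | h :: t => t.foldl (fun m x => max m x) h

def merge_cluster_bboxes (bboxes : List (Int × Int × Int × Int × Int)) (cluster : List Int) : Int × Int × Int × Int × Int :=
  let x1 := pvMinList (cluster.map (fun i => (pvFetch bboxes i).1))
  let y1 := pvMinList (cluster.map (fun i => (pvFetch bboxes i).2.1))
  let x2 := pvMaxList (cluster.map (fun i => (pvFetch bboxes i).2.2.1))
  let y2 := pvMaxList (cluster.map (fun i => (pvFetch bboxes i).2.2.2.1))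
  let total := cluster.foldl (fun s i => s + (pvFetch bboxes i).2.2.2.2) 0
  (x1, y1, x2, y2, total)

-- ===== PORT B =====
def pvStep (bboxes : List (Int × Int × Int × Int × Int)) (s : Int × Int × Int × Int × Int) (i : Int) : Int × Int × Int × Int × Int :=
  let b := pvFetch bboxes i
  (min s.1 b.1, min s.2.1 b.2.1, max s.2.2.1 b.2.2.1, max s.2.2.2.1 b.2.2.2.1, s.2.2.2.2 + b.2.2.2.2)

def merge_cluster_bboxes_alt (bboxes : List (Int × Int × Int × Int × Int)) (cluster : List Int) : Int × Int × Int × Int × Int :=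
  match cluster with
  | [] => (0, 0, 0, 0, 0)  -- B raises ValueError here; excluded by Pre_
  | i :: rest => rest.foldl (pvStep bboxes) (pvFetch bboxes i)

-- ===== PRECONDITION & SPEC =====
-- Pre_ excludes exactly the inputs where A raises: an empty cluster (ValueError from min()),
-- and any index outside Python's range -len(bboxes) ≤ i < len(bboxes) (IndexError).
def Pre_merge_cluster_bboxes (bboxes : List (Int × Int × Int × Int × Int)) (cluster : List Int) : Prop :=
  cluster ≠ [] ∧ ∀ i ∈ cluster, -(bboxes.length : Int) ≤ i ∧ i < (bboxes.length : Int)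
instance (bboxes : List (Int × Int × Int × Int × Int)) (cluster : List Int) : Decidable (Pre_merge_cluster_bboxes bboxes cluster) := by unfold Pre_merge_cluster_bboxes; infer_instance

def pvWitness_merge_cluster_bboxes : (List (Int × Int × Int × Int × Int)) × List Int :=
  ([(1, 2, 3, 4, 5), (0, 7, 9, 2, 6)], [0, 1, -1])

def Spec_merge_cluster_bboxes (bboxes : List (Int × Int × Int × Int × Int)) (cluster : List Int) (out : Int × Int × Int × Int × Int) : Prop := out = merge_cluster_bboxes_alt bboxes cluster
instance (bboxes : List (Int × Int × Int × Int × Int)) (cluster : List Int) (out : Int × Int × Int × Int × Int) : Decidable (Spec_merge_cluster_bboxes bboxes cluster out) := by unfold Spec_merge_cluster_bboxes; infer_instance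

-- ===== CLAIM (what is proved, stated in full; the proofs are below) =====
def Claim_equal_merge_cluster_bboxes : Prop := ∀ (bboxes : List (Int × Int × Int × Int × Int)) (cluster : List Int), Dom_merge_cluster_bboxes bboxes cluster → Pre_merge_cluster_bboxes bboxes cluster → Spec_merge_cluster_bboxes bboxes cluster (merge_cluster_bboxes bboxes cluster)

-- ===== LEMMAS AND PROOFS =====

-- B's single fold computes, componentwise, the five folds of A.
theorem pvStep_fold (bboxes : List (Int × Int × Int × Int × Int)) (rest : List Int)
    (s : Int × Int × Int × Int × Int) :
    rest.foldl (pvStep bboxes) s =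
      (rest.foldl (fun m i => min m (pvFetch bboxes i).1) s.1,
       rest.foldl (fun m i => min m (pvFetch bboxes i).2.1) s.2.1,
       rest.foldl (fun m i => max m (pvFetch bboxes i).2.2.1) s.2.2.1,
       rest.foldl (fun m i => max m (pvFetch bboxes i).2.2.2.1) s.2.2.2.1,
       rest.foldl (fun t i => t + (pvFetch bboxes i).2.2.2.2) s.2.2.2.2) := by
  induction rest generalizing s with
  | nil => rfl
  | cons j t ih => simp [List.foldl_cons, ih, pvStep]

-- ===== VERDICT (by name: the statement is the Claim_ definition above) =====
theorem merge_cluster_bboxes_spec : Claim_equal_merge_cluster_bboxes := by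
  intro bboxes cluster _ hpre
  unfold Spec_merge_cluster_bboxes
  obtain ⟨hne, -⟩ := hpre
  match cluster with
  | [] => exact absurd rfl hne
  | i :: rest =>
    simp only [merge_cluster_bboxes, merge_cluster_bboxes_alt, pvStep_fold,
      List.map_cons, pvMinList, pvMaxList, List.foldl_cons, List.foldl_map, zero_add]
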